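-- pv_equiv track=rewrite | github.com/NikitaNightBot/AoC | solutions/2023/1/solution.py | replace_digitwords
-- ===== SOURCE A (Python) =====
-- def replace_digitwords(
--     line: str,
--     mappings: dict[str, str] = {
--         "one": "1",
--         "two": "2",
--         "three": "3",
--         "four": "4",
--         "five": "5",
--         "six": "6",
--         "seven": "7",
--         "eight": "8",
--         "nine": "9",
--     },
-- ) -> str:
--     return "".join(
--         x
--         if (x := "".join(v for k, v in mappings.items() if line[i:].startswith(k)))
--         else line[i]
--         for i in range(len(line))
--     )
-- ===== SOURCE B (Python) =====
-- def replace_digitwords(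
--     line: str,
--     mappings: dict[str, str] = {
--         "one": "1",
--         "two": "2",
--         "three": "3",
--         "four": "4",
--         "five": "5",
--         "six": "6",
--         "seven": "7",
--         "eight": "8",
--         "nine": "9",
--     },
-- ) -> str:
--     # Word-driven: locate every occurrence of each word with str.find (no slicing),
--     # record its digits in a position table, then assemble the output in one pass.
--     n = len(line)
--     pos = {}
--     for k, v in mappings.items():
--         start = 0
--         while True:
--             r = line.find(k, start)
--             if not (0 <= r < n):
--                 break
--             pos[r] = pos.get(r, "") + v
--             start = r + 1
--     return "".join(p if (p := pos.get(i, "")) else line[i] for i in range(n))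
-- ===== Notes on version B (the rewrite author's own statement) =====
-- stated objective: faster
-- what changed: Instead of scanning every position and slicing line[i:] to test each word there, B locates all (overlapping) occurrences of each word with repeated str.find, accumulates the digits in a position->digits table, and assembles the result in one pass.
import Mathlib
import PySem

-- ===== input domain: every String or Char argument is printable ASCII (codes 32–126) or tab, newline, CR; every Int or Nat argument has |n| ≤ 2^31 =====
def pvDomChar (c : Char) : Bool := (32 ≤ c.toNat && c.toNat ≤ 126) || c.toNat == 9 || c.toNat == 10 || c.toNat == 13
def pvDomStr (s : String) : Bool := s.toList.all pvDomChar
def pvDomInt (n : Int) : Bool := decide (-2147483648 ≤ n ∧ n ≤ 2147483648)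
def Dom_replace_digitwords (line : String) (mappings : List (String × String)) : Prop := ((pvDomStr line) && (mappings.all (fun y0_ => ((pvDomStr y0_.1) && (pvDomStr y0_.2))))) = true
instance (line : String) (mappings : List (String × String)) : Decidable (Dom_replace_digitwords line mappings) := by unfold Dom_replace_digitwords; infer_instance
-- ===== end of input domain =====

-- B replaces A's per-position scan (which slices line[i:] at every i) by a word-driven
-- str.find loop building a position→digits table once, then one assembly pass; the
-- timing run measured B faster.

-- ===== PORT A =====
def replace_digitwords (line : String) (mappings : List (String × String)) : String :=
  let cs := line.toList
  String.ofList <| (List.range cs.length).flatMap (fun i =>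
    let x := mappings.foldl
      (fun acc kv => if PySem.Chars.startswith (cs.drop i) kv.1.toList then acc ++ kv.2.toList else acc) []
    if x = [] then [cs.getD i ' '] else x)

-- ===== PORT B =====
-- `line.find(k, start)` with start past the end returns -1 (for the loop's termination)
theorem pvFindFrom_high (cs k : List Char) (s : Nat) (h : cs.length < s) :
    PySem.Chars.findFrom cs k (s : Int) none = -1 := by
  simp [PySem.Chars.findFrom]; omega

theorem pvFindFrom_ge (cs k : List Char) (s : Nat)
    (h : 0 ≤ PySem.Chars.findFrom cs k (s : Int) none) :
    (s : Int) ≤ PySem.Chars.findFrom cs k (s : Int) none := by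
  by_cases hs : s ≤ cs.length
  · exact (PySem.Chars.findFrom_natCast_spec cs k s hs (by omega)).1
  · rw [pvFindFrom_high cs k s (by omega)] at h; omega

-- the `while True: r = line.find(k, start); …` loop of B
def pvFindLoop (cs k v : List Char) (pos : PySem.Dict Nat (List Char)) (start : Nat) :
    PySem.Dict Nat (List Char) :=
  let r := PySem.Chars.findFrom cs k (start : Int) none
  if h : 0 ≤ r ∧ r < (cs.length : Int) then
    pvFindLoop cs k v (pos.insert r.toNat (pos.getD r.toNat [] ++ v)) (r.toNat + 1)
  else pos
termination_by cs.length - start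
decreasing_by
  have := pvFindFrom_ge cs k start h.1
  omega

def replace_digitwords_alt (line : String) (mappings : List (String × String)) : String :=
  let cs := line.toList
  let n := cs.length
  let pos := mappings.foldl (fun pos kv => pvFindLoop cs kv.1.toList kv.2.toList pos 0) PySem.Dict.empty
  String.ofList <| (List.range n).flatMap (fun i =>
    let p := pos.getD i []
    if p = [] then [cs.getD i ' '] else p)

-- ===== PRECONDITION & SPEC =====
def Spec_replace_digitwords (line : String) (mappings : List (String × String)) (out : String) : Prop := out = replace_digitwords_alt line mappings
instance (line : String) (mappings : List (String × String)) (out : String) : Decidable (Spec_replace_digitwords line mappings out) := by unfold Spec_replace_digitwords; infer_instance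

-- ===== CLAIM (what is proved, stated in full; the proofs are below) =====
def Claim_equal_replace_digitwords : Prop := ∀ (line : String) (mappings : List (String × String)), Dom_replace_digitwords line mappings → Spec_replace_digitwords line mappings (replace_digitwords line mappings)

-- ===== LEMMAS AND PROOFS =====

-- a prefix at i ≥ s is an infix of the suffix from s
theorem pvPrefix_infix (cs k : List Char) (i s : Nat) (hs : s ≤ i) (h : k <+: cs.drop i) :
    k <:+: cs.drop s := by
  have h2 : k <+: (cs.drop s).drop (i - s) := by
    rw [List.drop_drop, Nat.add_sub_cancel' hs]; exact h
  exact h2.isInfix.trans (List.drop_suffix _ _).isInfix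

-- A's per-position accumulation, as a flatMap
theorem pvFoldA (cs : List Char) (i : Nat) (ms : List (String × String)) (a : List Char) :
    ms.foldl (fun acc kv =>
        if PySem.Chars.startswith (cs.drop i) kv.1.toList then acc ++ kv.2.toList else acc) a =
      a ++ ms.flatMap (fun kv =>
        if PySem.Chars.startswith (cs.drop i) kv.1.toList then kv.2.toList else []) := by
  have h1 := PySem.List.foldl_congr_mem (l := ms) (init := a)
      (f := fun acc kv => if PySem.Chars.startswith (cs.drop i) kv.1.toList then acc ++ kv.2.toList else acc)
      (g := fun acc kv => acc ++ (if PySem.Chars.startswith (cs.drop i) kv.1.toList then kv.2.toList else []))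
      (by intro acc kv _; simp only []; split <;> simp)
  rw [h1]
  exact PySem.List.foldl_append_eq_flatMap _ _ _

-- the find-loop appends v at key i exactly when i is an occurrence of k at or after start
theorem pvFindLoop_getD (cs k v : List Char) (i : Nat) (hi : i < cs.length)
    (start : Nat) (pos : PySem.Dict Nat (List Char)) :
    (pvFindLoop cs k v pos start).getD i [] =
      pos.getD i [] ++
        (if start ≤ i ∧ PySem.Chars.startswith (cs.drop i) k then v else []) := by
  fun_induction pvFindLoop cs k v pos start with
  | case1 pos start r h ih =>
    have hsle : start ≤ cs.length := by
      by_contra hgt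
      have := pvFindFrom_high cs k start (by omega)
      simp only [r] at h; omega
    have hspec := PySem.Chars.findFrom_natCast_spec cs k start hsle (by omega)
    rw [ih]
    rw [PySem.Dict.getD_insert]
    by_cases hir : i = r.toNat
    · subst hir
      have hsw : PySem.Chars.startswith (cs.drop r.toNat) k = true := by
        rw [PySem.Chars.startswith_iff]; exact hspec.2.1
      simp [hsw]
      omega
    · simp only [if_neg hir]
      by_cases hsw : PySem.Chars.startswith (cs.drop i) k = true
      · have hnotlt : ¬ (start ≤ i ∧ i < r.toNat) := by
          rintro ⟨h1, h2⟩
          exact (hspec.2.2 i h1 h2) ((PySem.Chars.startswith_iff _ _).1 hsw)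
        have : (r.toNat + 1 ≤ i ∧ PySem.Chars.startswith (cs.drop i) k = true)
             ↔ (start ≤ i ∧ PySem.Chars.startswith (cs.drop i) k = true) := by
          constructor
          · rintro ⟨h1, h2⟩; exact ⟨by omega, h2⟩
          · rintro ⟨h1, h2⟩; refine ⟨by omega, h2⟩
        rw [if_congr this rfl rfl]
      · simp [hsw]
  | case2 pos start r h =>
    have : ¬ (start ≤ i ∧ PySem.Chars.startswith (cs.drop i) k = true) := by
      rintro ⟨h1, h2⟩
      have hsle : start ≤ cs.length := by omega
      have hinf : k <:+: cs.drop start :=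
        pvPrefix_infix cs k i start h1 ((PySem.Chars.startswith_iff _ _).1 h2)
      have hne : PySem.Chars.findFrom cs k (start : Int) none ≠ -1 := fun hc =>
        ((PySem.Chars.findFrom_natCast_eq_neg_one_iff cs k start hsle).1 hc) hinf
      have hval := PySem.Chars.findFrom_natCast cs k start hsle
      have hfind := PySem.Chars.neg_one_le_find (cs.drop start) k
      have hr0 : 0 ≤ r := by
        simp only [r] at *
        rw [hval] at hne ⊢
        split at hne
        · simp at hne
        · split
          · omega
          · rename_i hnn; omega
      have hspec := PySem.Chars.findFrom_natCast_spec cs k start hsle (by simpa [r] using hne)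
      have hrge : (cs.length : Int) ≤ r := by simp only [r] at *; omega
      exact (hspec.2.2 i h1 (by simp only [r] at hrge ⊢; omega))
        ((PySem.Chars.startswith_iff _ _).1 h2)
    simp [this]

-- the table built by B's outer loop holds, at each position, A's concatenation of matches
theorem pvTable_getD (cs : List Char) (ms : List (String × String)) (i : Nat) (hi : i < cs.length) :
    ∀ (d : PySem.Dict Nat (List Char)),
      (ms.foldl (fun pos kv => pvFindLoop cs kv.1.toList kv.2.toList pos 0) d).getD i [] =
        d.getD i [] ++
          ms.flatMap (fun kv =>
            if PySem.Chars.startswith (cs.drop i) kv.1.toList then kv.2.toList else []) := by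
  induction ms with
  | nil => intro d; simp
  | cons kv rest ih =>
    intro d
    simp only [List.foldl_cons, List.flatMap_cons]
    rw [ih, pvFindLoop_getD cs kv.1.toList kv.2.toList i hi 0 d]
    simp [List.append_assoc]

-- ===== VERDICT (by name: the statement is the Claim_ definition above) =====
theorem replace_digitwords_spec : Claim_equal_replace_digitwords := by
  intro line mappings _
  unfold Spec_replace_digitwords replace_digitwords replace_digitwords_alt
  refine congrArg String.ofList (List.flatMap_congr fun i hi => ?_)
  have hin : i < line.toList.length := by simpa using List.mem_range.1 hi
  simp only []
  rw [pvTable_getD line.toList mappings i hin PySem.Dict.empty,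
      pvFoldA line.toList i mappings []]
  rw [PySem.Dict.getD_empty, List.nil_append]
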